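-- pv_equiv track=rewrite | github.com/SeongHyukJang/HackRank | Algorithms/Strings/Gemstones.py | gemstones
-- ===== SOURCE A (Python) =====
-- def gemstones(arr):
--     characters = set(arr[0])
--
--     res = 0
--     for char in characters:
--         check = True
--         for stones in arr:
--             if char not in set(stones):
--                 check = False
--                 break
--         if check:
--             res += 1
--
--     return res
-- ===== SOURCE B (Python) =====
-- def gemstones(arr):
--     n = len(arr)
--     freq = {}
--     for s in arr:
--         for c in set(s):
--             freq[c] = freq.get(c, 0) + 1
--     return sum(1 for c in set(arr[0]) if freq.get(c, 0) == n)
-- ===== Notes on version B (the rewrite author's own statement) =====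
-- stated objective: alternative
-- what changed: Replaced A's per-candidate rescan of every string (rebuilding set(stones) for each candidate character) with one pass that builds a char -> number-of-containing-strings frequency table, then a single pass over set(arr[0]) counting characters whose frequency equals len(arr).
import Mathlib
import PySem

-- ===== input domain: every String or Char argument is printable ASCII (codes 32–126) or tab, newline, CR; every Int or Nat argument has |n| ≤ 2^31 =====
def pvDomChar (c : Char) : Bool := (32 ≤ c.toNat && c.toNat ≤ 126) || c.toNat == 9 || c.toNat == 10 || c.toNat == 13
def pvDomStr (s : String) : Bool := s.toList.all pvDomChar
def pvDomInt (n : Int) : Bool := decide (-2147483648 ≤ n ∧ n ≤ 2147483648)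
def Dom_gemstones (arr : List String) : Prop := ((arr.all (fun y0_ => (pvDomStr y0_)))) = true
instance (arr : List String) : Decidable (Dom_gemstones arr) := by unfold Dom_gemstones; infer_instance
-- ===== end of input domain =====

-- B builds one char -> number-of-containing-strings table and counts candidates once,
-- instead of A's per-candidate rescan of every string (objective: alternative algorithm).
-- Pre_ excludes the empty list, on which both Pythons raise IndexError at arr[0].

-- ===== PORT A =====
-- A's inner 'for stones in arr: … break' loop
def gemstonesCheck (char : Char) : List String → Bool
  | [] => true
  | stones :: rest =>
    if ¬ (PySem.Set.contains (PySem.Set.ofList stones.toList) char) then false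
    else gemstonesCheck char rest

def gemstones (arr : List String) : Int :=
  let characters := PySem.Set.ofList (PySem.List.pyGetD arr 0 "").toList
  characters.foldl (fun res char => if gemstonesCheck char arr then res + 1 else res) 0

-- ===== PORT B =====
def gemstones_alt (arr : List String) : Int :=
  let n : Int := arr.length
  let freq : PySem.Dict Char Int :=
    arr.foldl (fun d s =>
      (PySem.Set.ofList s.toList).foldl (fun d c => PySem.Dict.modify d c 0 (· + 1)) d)
      PySem.Dict.empty
  (PySem.Set.ofList (PySem.List.pyGetD arr 0 "").toList).foldl
    (fun res c => if PySem.Dict.getD freq c 0 = n then res + 1 else res) 0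

-- ===== PRECONDITION & SPEC =====
def Pre_gemstones (arr : List String) : Prop := arr ≠ []
instance (arr : List String) : Decidable (Pre_gemstones arr) := by unfold Pre_gemstones; infer_instance
def pvWitness_gemstones : List String := ["ab", "cab"]

def Spec_gemstones (arr : List String) (out : Int) : Prop := out = gemstones_alt arr
instance (arr : List String) (out : Int) : Decidable (Spec_gemstones arr out) := by unfold Spec_gemstones; infer_instance

-- ===== CLAIM (what is proved, stated in full; the proofs are below) =====
def Claim_equal_gemstones : Prop := ∀ (arr : List String), Dom_gemstones arr → Pre_gemstones arr → Spec_gemstones arr (gemstones arr)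

-- ===== LEMMAS AND PROOFS =====

-- A's inner loop decides "char is in every string of arr"
theorem gemstonesCheck_eq_all (char : Char) (arr : List String) :
    gemstonesCheck char arr = arr.all (fun s => decide (char ∈ s.toList)) := by
  induction arr with
  | nil => rfl
  | cons s rest ih =>
    simp only [gemstonesCheck, List.all_cons, ih]
    by_cases h : char ∈ s.toList <;>
      simp [PySem.Set.mem_ofList, h]

-- the frequency table counts, for each char, the strings that contain it
theorem freq_getD (arr : List String) (d : PySem.Dict Char Int) (c : Char) :
    PySem.Dict.getD
      (arr.foldl (fun d s =>
        (PySem.Set.ofList s.toList).foldl (fun d c => PySem.Dict.modify d c 0 (· + 1)) d) d)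
      c 0
    = PySem.Dict.getD d c 0 + (arr.countP (fun s => decide (c ∈ s.toList)) : Int) := by
  induction arr generalizing d with
  | nil => simp
  | cons s rest ih =>
    rw [List.foldl_cons, ih, PySem.Dict.getD_foldl_modify_add_one, List.countP_cons]
    have hnd := PySem.Set.nodup_ofList (xs := s.toList)
    by_cases h : c ∈ s.toList
    · rw [List.count_eq_one_of_mem hnd (by simpa [PySem.Set.mem_ofList] using h)]
      simp [h]; ring
    · rw [List.count_eq_zero_of_not_mem (by simpa [PySem.Set.mem_ofList] using h)]
      simp [h]

theorem countP_eq_length_int (p : String → Bool) (arr : List String) :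
    ((arr.countP p : Int) = (arr.length : Int)) ↔ arr.all p = true := by
  rw [Int.natCast_inj (m := arr.countP p) (n := arr.length)]
  constructor
  · intro h
    simpa [List.all_eq_true] using (List.countP_eq_length (l := arr) (p := p)).mp h
  · intro h
    exact (List.countP_eq_length (l := arr) (p := p)).mpr (by simpa [List.all_eq_true] using h)

-- ===== VERDICT (by name: the statement is the Claim_ definition above) =====
theorem gemstones_spec : Claim_equal_gemstones := by
  intro arr _hDom _hPre
  unfold Spec_gemstones gemstones gemstones_alt
  simp only []
  apply PySem.List.foldl_congr_mem
  intro res c _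
  rw [gemstonesCheck_eq_all, freq_getD, PySem.Dict.getD_empty]
  rw [show (0 : Int) + (arr.countP (fun s => decide (c ∈ s.toList)) : Int)
      = (arr.countP (fun s => decide (c ∈ s.toList)) : Int) from by ring]
  by_cases h : arr.all (fun s => decide (c ∈ s.toList)) = true
  · rw [if_pos h, if_pos ((countP_eq_length_int _ arr).mpr h)]
  · rw [if_neg h, if_neg (by intro hc; exact h ((countP_eq_length_int _ arr).mp hc))]
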